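-- pv_equiv track=rewrite | github.com/UWPCE-PythonCert-ClassRepos/Self_Paced-Online | students/csdotson/lesson04/trigrams.py | fix_punctuation_and_display
-- ===== SOURCE A (Python) =====
-- ENDING_PUNC = [".", "?", "!"]
--
-- OTHER_PUNC = [",", ";", ":"]
--
-- def fix_punctuation_and_display(story):
--     # Capitalize beginning of story, remove spacing around punctuation, capitalize after ending punctuation
--     final_story = story.capitalize()
--     for entry in OTHER_PUNC + ENDING_PUNC:
--         final_story = final_story.replace(f' {entry}', entry)
--     word_array = final_story.split()
--     for index in range(len(word_array)-1):
--         if '.' in word_array[index] or '!' in word_array[index] or '?' in word_array[index]: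
--             word_array[index+1] = word_array[index+1].capitalize()
--     final_story = ' '.join(word_array)
--     return(final_story)
-- ===== SOURCE B (Python) =====
-- ENDING_PUNC = [".", "?", "!"]
--
-- OTHER_PUNC = [",", ";", ":"]
--
-- def fix_punctuation_and_display(story):
--     # Phase 1 as in the original: capitalize, tighten spacing before punctuation.
--     final_story = story.capitalize()
--     for entry in OTHER_PUNC + ENDING_PUNC:
--         final_story = final_story.replace(f' {entry}', entry)
--     # Phase 2 rewritten as a character-level state machine: one scan over the
--     # characters emits the output directly (single-space separators between
--     # words, first letter of a word upper-cased when the previous word carried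
--     # ending punctuation) -- no split(), no word array, no join().
--     out = []
--     cap_next = False    # the current sentence's previous word had ending punctuation
--     in_word = False
--     started = False     # some word has been emitted already
--     for c in final_story:
--         if c.isspace():
--             in_word = False
--         else:
--             if not in_word:
--                 if started:
--                     out.append(' ')
--                 if cap_next:
--                     c = c.upper()
--                 cap_next = False
--                 in_word = True
--                 started = True
--             out.append(c)
--             if c in '.?!':
--                 cap_next = True
--     return ''.join(out)
-- ===== Notes on version B (the rewrite author's own statement) =====
-- stated objective: alternative
-- what changed: The split()/index-loop-mutating-word_array/join() phase is replaced by a single character-level state machine that scans the tightened string once and emits the output characters directly (separator, word-start capitalization and the sentence-end flag handled in one pass, with no word array at all).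
import Mathlib
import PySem

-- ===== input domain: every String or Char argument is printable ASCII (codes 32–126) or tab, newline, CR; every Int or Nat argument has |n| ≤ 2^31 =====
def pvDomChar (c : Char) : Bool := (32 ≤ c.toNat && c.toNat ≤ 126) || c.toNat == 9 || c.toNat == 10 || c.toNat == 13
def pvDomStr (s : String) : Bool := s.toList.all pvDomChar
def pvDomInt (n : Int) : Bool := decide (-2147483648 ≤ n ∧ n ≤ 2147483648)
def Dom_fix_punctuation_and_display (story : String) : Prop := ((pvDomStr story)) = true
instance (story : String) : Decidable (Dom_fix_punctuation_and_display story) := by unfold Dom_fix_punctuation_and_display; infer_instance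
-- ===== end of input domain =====

-- B replaces A's split()/index-loop/join() phase by a single character-level state
-- machine that emits the output directly (objective: alternative; same asymptotic cost).

-- ===== PORT A =====
-- str.capitalize(): first char upper-cased, the rest lower-cased; exact on the ASCII domain
def pyCapitalize (s : String) : String :=
  String.ofList (match s.toList with
    | [] => []
    | c :: rest => PySem.Chars.upperChar c :: PySem.Chars.lower rest)

-- body of A's 'for index in range(len(word_array)-1)' loop
def pvAStep (arr : List String) (index : Int) : List String :=
  if PySem.Str.isIn "." (PySem.List.pyGetD arr index "")
      || PySem.Str.isIn "!" (PySem.List.pyGetD arr index "")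
      || PySem.Str.isIn "?" (PySem.List.pyGetD arr index "") then
    PySem.List.pySetD arr (index + 1) (pyCapitalize (PySem.List.pyGetD arr (index + 1) ""))
  else arr

def fix_punctuation_and_display (story : String) : String :=
  let final0 := pyCapitalize story
  -- f' {entry}' ported as String.ofList (' ' :: entry.toList), exact
  let final1 := ([",", ";", ":"] ++ [".", "?", "!"]).foldl
    (fun fs entry => PySem.Str.replace fs (String.ofList (' ' :: entry.toList)) entry) final0
  let word_array := PySem.Str.split₀ final1
  let word_array2 :=
    (PySem.List.pyRange 0 ((word_array.length : Int) - 1) 1).foldl pvAStep word_array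
  PySem.Str.join " " word_array2

-- ===== PORT B =====
-- c in '.?!'
def pvIsEnd (c : Char) : Bool := c == '.' || c == '?' || c == '!'

-- the character-level state machine of Source B: cap = capitalize next word start,
-- inw = currently inside a word, started = a word has been emitted already
def pvScan : Bool → Bool → Bool → List Char → List Char
  | _, _, _, [] => []
  | cap, inw, started, c :: rest =>
    if PySem.Chars.isspace c then pvScan cap false started rest
    else if inw then c :: pvScan (cap || pvIsEnd c) true started rest
    else
      (if started then [' '] else []) ++
        ((if cap then PySem.Chars.upperChar c else c) ::
          pvScan (pvIsEnd (if cap then PySem.Chars.upperChar c else c)) true true rest)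

def fix_punctuation_and_display_alt (story : String) : String :=
  let final0 := pyCapitalize story
  let final1 := ([",", ";", ":"] ++ [".", "?", "!"]).foldl
    (fun fs entry => PySem.Str.replace fs (String.ofList (' ' :: entry.toList)) entry) final0
  String.ofList (pvScan false false false final1.toList)

-- ===== PRECONDITION & SPEC =====
def Spec_fix_punctuation_and_display (story : String) (out : String) : Prop := out = fix_punctuation_and_display_alt story
instance (story : String) (out : String) : Decidable (Spec_fix_punctuation_and_display story out) := by unfold Spec_fix_punctuation_and_display; infer_instance

-- ===== CLAIM (what is proved, stated in full; the proofs are below) =====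
def Claim_equal_fix_punctuation_and_display : Prop := ∀ (story : String), Dom_fix_punctuation_and_display story → Spec_fix_punctuation_and_display story (fix_punctuation_and_display story)

-- ===== LEMMAS AND PROOFS =====

-- ---- A-side phase 2: the index loop equals a flag-passing loop over the words ----

def pvHasEndingPunc (w : String) : Bool :=
  [".", "?", "!"].any (fun p => PySem.Str.isIn p w)

def pvBLoop (flag : Bool) (ws : List String) : List String :=
  match ws with
  | [] => []
  | w :: rest =>
    let w' := if flag then pyCapitalize w else w
    w' :: pvBLoop (pvHasEndingPunc w') rest

lemma pvHasEndingPunc_eq (w : String) :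
    pvHasEndingPunc w
      = (PySem.Str.isIn "." w || PySem.Str.isIn "!" w || PySem.Str.isIn "?" w) := by
  unfold pvHasEndingPunc
  cases h1 : PySem.Str.isIn "." w <;> cases h2 : PySem.Str.isIn "!" w <;>
    cases h3 : PySem.Str.isIn "?" w <;> simp_all

lemma pvGetD_append (pre l : List String) (n : Nat) (d : String) :
    (pre ++ l).getD (pre.length + n) d = l.getD n d := by
  induction pre with
  | nil => simp
  | cons x xs ih => simpa [Nat.succ_add] using ih

lemma pvSet_append (pre l : List String) (n : Nat) (v : String) :
    (pre ++ l).set (pre.length + n) v = pre ++ l.set n v := by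
  induction pre with
  | nil => simp
  | cons x xs ih => simpa [Nat.succ_add] using ih

lemma pvBLoop_cons (flag : Bool) (w : String) (t : List String) :
    pvBLoop flag (w :: t)
      = (if flag then pyCapitalize w else w)
          :: pvBLoop (pvHasEndingPunc (if flag then pyCapitalize w else w)) t := rfl

lemma pvMain (t : List String) (pre : List String) (w : String) :
    (PySem.List.pyRange (pre.length : Int)
        ((pre.length : Int) + (1 + t.length) - 1) 1).foldl pvAStep (pre ++ w :: t)
      = pre ++ w :: pvBLoop (pvHasEndingPunc w) t := by
  induction t generalizing pre w with
  | nil =>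
    rw [show ((pre.length : Int) + (1 + ([] : List String).length) - 1) = (pre.length : Int) by
      simp]
    rw [PySem.List.pyRange_one_eq_nil (by omega)]
    simp [pvBLoop]
  | cons h tt ih =>
    rw [PySem.List.pyRange_one_cons (by simp; omega)]
    have hget0 : PySem.List.pyGetD (pre ++ w :: h :: tt) (pre.length : Int) "" = w := by
      rw [PySem.List.pyGetD_natCast]
      simpa using pvGetD_append pre (w :: h :: tt) 0 ""
    have hget1 : PySem.List.pyGetD (pre ++ w :: h :: tt) ((pre.length : Int) + 1) "" = h := by
      rw [show ((pre.length : Int) + 1) = ((pre.length + 1 : Nat) : Int) by push_cast; ring]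
      rw [PySem.List.pyGetD_natCast]
      simpa using pvGetD_append pre (w :: h :: tt) 1 ""
    have hstep : pvAStep (pre ++ w :: h :: tt) (pre.length : Int)
        = pre ++ w :: (if pvHasEndingPunc w then pyCapitalize h else h) :: tt := by
      unfold pvAStep
      rw [hget0, hget1, ← pvHasEndingPunc_eq]
      by_cases hp : pvHasEndingPunc w
      · rw [if_pos hp, if_pos hp]
        rw [show ((pre.length : Int) + 1) = ((pre.length + 1 : Nat) : Int) by push_cast; ring]
        rw [PySem.List.pySetD_natCast]
        simpa using pvSet_append pre (w :: h :: tt) 1 (pyCapitalize h)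
      · rw [if_neg hp, if_neg hp]
    rw [List.foldl_cons, hstep]
    have harith : ((pre.length : Int) + (1 + ((h :: tt) : List String).length) - 1)
        = (((pre ++ [w]).length : Int) + (1 + (tt : List String).length) - 1) := by
      simp; push_cast; ring
    have hpre : (pre.length : Int) + 1 = ((pre ++ [w]).length : Int) := by simp
    rw [harith, hpre,
      show pre ++ w :: (if pvHasEndingPunc w then pyCapitalize h else h) :: tt
        = (pre ++ [w]) ++ (if pvHasEndingPunc w then pyCapitalize h else h) :: tt by simp]
    rw [ih (pre ++ [w]) (if pvHasEndingPunc w then pyCapitalize h else h)]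
    rw [pvBLoop_cons]
    by_cases hp : pvHasEndingPunc w <;> simp [hp]

lemma pvPhase2 (ws : List String) :
    (PySem.List.pyRange 0 ((ws.length : Int) - 1) 1).foldl pvAStep ws
      = pvBLoop false ws := by
  cases ws with
  | nil =>
    rw [PySem.List.pyRange_one_eq_nil (by simp)]
    simp [pvBLoop]
  | cons w t =>
    have := pvMain t [] w
    simp only [List.length_nil, Nat.cast_zero, List.nil_append, zero_add] at this
    rw [show ((w :: t : List String).length : Int) - 1 = (1 + (t.length : Int)) - 1 by
      simp]
    rw [this, pvBLoop_cons]
    simp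

-- ---- character-level helpers ----

-- lower-casing a char is idempotent
lemma pvLowerChar_idem (c : Char) :
    PySem.Chars.lowerChar (PySem.Chars.lowerChar c) = PySem.Chars.lowerChar c := by
  unfold PySem.Chars.lowerChar PySem.Chars.isupper
  have hA : ('A').val.toNat = 65 := rfl
  have hZ : ('Z').val.toNat = 90 := rfl
  have hcv : ∀ d : Char, d.val.toNat = d.toNat := fun _ => rfl
  split
  · next h =>
    simp only [Bool.and_eq_true, decide_eq_true_eq, Char.le_def, UInt32.le_iff_toNat_le,
      hA, hZ, hcv] at h
    have ht : (Char.ofNat (c.toNat + 32)).toNat = c.toNat + 32 := by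
      rw [Char.toNat_ofNat, if_pos (Or.inl (by omega))]
    rw [if_neg]
    simp only [Bool.and_eq_true, decide_eq_true_eq, Char.le_def, UInt32.le_iff_toNat_le,
      hA, hZ, hcv, ht]
    omega
  · rfl

-- every char of l.tail is fixed by lower-casing
def pvTailLF (l : List Char) : Prop := ∀ c ∈ l.tail, PySem.Chars.lowerChar c = c

lemma pvTailLF_of_sublist {l' l : List Char} (h : l'.Sublist l) (hl : pvTailLF l) :
    pvTailLF l' := fun c hc => hl c ((h.tail).subset hc)

lemma pvTailLF_capitalize (s : String) : pvTailLF (pyCapitalize s).toList := by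
  unfold pyCapitalize
  rw [String.toList_ofList]
  cases s.toList with
  | nil => intro c hc; simp at hc
  | cons c rest =>
    intro d hd
    simp only [List.tail_cons, PySem.Chars.lower, List.mem_map] at hd
    obtain ⟨x, _, hx⟩ := hd
    rw [← hx]; exact pvLowerChar_idem x

-- replace s (' '::p) p only ever deletes characters: the result is a sublist
lemma pvReplaceGo_sublist (old new : List Char) (hnew : new.Sublist old) :
    ∀ (fuel : Nat) (l acc : List Char),
      (PySem.Chars.replace.go old new fuel l acc).Sublist (acc.reverse ++ l) := by
  intro fuel
  induction fuel with
  | zero => intro l acc; simp [PySem.Chars.replace.go]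
  | succ n ih =>
    intro l acc
    cases l with
    | nil => simp [PySem.Chars.replace.go]
    | cons c t =>
      simp only [PySem.Chars.replace.go]
      split
      · next hp =>
        have hpre : old <+: c :: t := List.isPrefixOf_iff_prefix.mp hp
        obtain ⟨s, hs⟩ := hpre
        have hdrop : List.drop old.length (c :: t) = s := by
          rw [← hs]; exact List.drop_left
        have h1 := ih (List.drop old.length (c :: t)) (new.reverse ++ acc)
        rw [hdrop] at h1 ⊢
        have h2 : (new.reverse ++ acc).reverse ++ s = acc.reverse ++ (new ++ s) := by
          simp
        rw [h2] at h1
        refine h1.trans ?_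
        have h3 : (new ++ s).Sublist (old ++ s) := hnew.append_right s
        have := h3.append_left acc.reverse
        rwa [show acc.reverse ++ (old ++ s) = acc.reverse ++ (c :: t) by rw [← hs]] at this
      · next hp =>
        have h1 := ih t (c :: acc)
        rwa [show (c :: acc).reverse ++ t = acc.reverse ++ (c :: t) by simp] at h1

lemma pvReplace_sublist (s : List Char) (p : List Char) :
    (PySem.Chars.replace s (' ' :: p) p).Sublist s := by
  unfold PySem.Chars.replace
  rw [if_neg (by simp)]
  simpa using pvReplaceGo_sublist (' ' :: p) p (List.sublist_cons_self _ _) s.length s []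

lemma pvTailLF_foldl (ps : List String) :
    ∀ fs : String, pvTailLF fs.toList →
      pvTailLF ((ps.foldl
        (fun fs entry => PySem.Str.replace fs (String.ofList (' ' :: entry.toList)) entry)
        fs).toList) := by
  induction ps with
  | nil => intro fs h; exact h
  | cons p rest ih =>
    intro fs h
    rw [List.foldl_cons]
    apply ih
    rw [PySem.Str.toList_replace, String.toList_ofList]
    exact pvTailLF_of_sublist (pvReplace_sublist fs.toList p.toList) h

-- ---- the word decomposition computed by Python str.split() ----

def pvNotSpace (c : Char) : Bool := !PySem.Chars.isspace c

def pvWords : List Char → List (List Char)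
  | [] => []
  | c :: rest =>
    if PySem.Chars.isspace c then pvWords rest
    else (c :: rest.takeWhile pvNotSpace) :: pvWords (rest.dropWhile pvNotSpace)
termination_by l => l.length
decreasing_by
  all_goals have := List.length_dropWhile_le pvNotSpace rest
  all_goals simp
  all_goals omega

lemma pvWords_nil : pvWords [] = [] := by simp [pvWords]

lemma pvGo_acc (l : List Char) : ∀ (cur : List Char) (acc' : List (List Char)),
    PySem.Chars.split₀.go l cur acc' = acc'.reverse ++ PySem.Chars.split₀.go l cur [] := by
  induction l with
  | nil =>
    intro cur acc'
    simp only [PySem.Chars.split₀.go]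
    split
    · simp
    · simp
  | cons c rest ih =>
    intro cur acc'
    simp only [PySem.Chars.split₀.go]
    split
    · split
      · exact ih [] acc'
      · rw [ih [] (cur.reverse :: acc'), ih [] [cur.reverse]]
        simp
    · exact ih (c :: cur) acc'

lemma pvGo_word (l : List Char) : ∀ (cur : List Char), cur ≠ [] →
    PySem.Chars.split₀.go l cur []
      = (cur.reverse ++ l.takeWhile pvNotSpace)
          :: PySem.Chars.split₀.go (l.dropWhile pvNotSpace) [] [] := by
  induction l with
  | nil =>
    intro cur h
    simp only [PySem.Chars.split₀.go]
    rw [if_neg (by simpa using h)]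
    simp [PySem.Chars.split₀.go]
  | cons c rest ih =>
    intro cur h
    by_cases hc : PySem.Chars.isspace c
    · have h1 : PySem.Chars.split₀.go (c :: rest) cur []
          = PySem.Chars.split₀.go rest [] [cur.reverse] := by
        simp only [PySem.Chars.split₀.go]
        rw [if_pos hc, if_neg (by simpa using h)]
      rw [h1, pvGo_acc]
      have ht : (c :: rest).takeWhile pvNotSpace = [] := by
        simp [List.takeWhile, pvNotSpace, hc]
      have hd : (c :: rest).dropWhile pvNotSpace = c :: rest := by
        simp [List.dropWhile, pvNotSpace, hc]
      have h2 : PySem.Chars.split₀.go (c :: rest) [] [] = PySem.Chars.split₀.go rest [] [] := by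
        simp only [PySem.Chars.split₀.go]
        rw [if_pos hc, if_pos (by simp)]
      rw [ht, hd, h2]
      simp
    · have h1 : PySem.Chars.split₀.go (c :: rest) cur []
          = PySem.Chars.split₀.go rest (c :: cur) [] := by
        simp only [PySem.Chars.split₀.go]
        rw [if_neg hc]
      rw [h1, ih (c :: cur) (by simp)]
      have ht : (c :: rest).takeWhile pvNotSpace = c :: rest.takeWhile pvNotSpace := by
        simp [List.takeWhile, pvNotSpace, hc]
      have hd : (c :: rest).dropWhile pvNotSpace = rest.dropWhile pvNotSpace := by
        simp [List.dropWhile, pvNotSpace, hc]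
      rw [ht, hd]
      simp

lemma pvSplit_aux (n : Nat) : ∀ (l : List Char), l.length ≤ n →
    PySem.Chars.split₀.go l [] [] = pvWords l := by
  induction n with
  | zero =>
    intro l hl
    rw [List.length_eq_zero_iff.mp (Nat.le_zero.mp hl)]
    simp [PySem.Chars.split₀.go, pvWords]
  | succ n ih =>
    intro l hl
    cases l with
    | nil => simp [PySem.Chars.split₀.go, pvWords]
    | cons c rest =>
      by_cases hc : PySem.Chars.isspace c
      · have h1 : PySem.Chars.split₀.go (c :: rest) [] [] = PySem.Chars.split₀.go rest [] [] := by
          simp only [PySem.Chars.split₀.go]; rw [if_pos hc, if_pos (by simp)]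
        rw [h1, ih rest (by simpa using Nat.le_of_succ_le_succ hl), pvWords, if_pos hc]
      · have h1 : PySem.Chars.split₀.go (c :: rest) [] [] = PySem.Chars.split₀.go rest [c] [] := by
          simp only [PySem.Chars.split₀.go]; rw [if_neg hc]
        rw [h1, pvGo_word rest [c] (by simp)]
        rw [ih (rest.dropWhile pvNotSpace)
          (by have := List.length_dropWhile_le pvNotSpace rest; simp at hl ⊢; omega)]
        rw [pvWords, if_neg hc]
        simp

lemma pvSplit_eq_words (l : List Char) : PySem.Chars.split₀ l = pvWords l := by
  unfold PySem.Chars.split₀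
  exact pvSplit_aux l.length l (le_refl _)

-- ---- all-lowercase facts about the words ----

def pvAllLF (w : List Char) : Prop := ∀ c ∈ w, PySem.Chars.lowerChar c = c

lemma pvWords_allLF (n : Nat) : ∀ (l : List Char), l.length ≤ n → pvAllLF l →
    ∀ w ∈ pvWords l, pvAllLF w := by
  induction n with
  | zero =>
    intro l hl _
    rw [List.length_eq_zero_iff.mp (Nat.le_zero.mp hl)]
    simp [pvWords]
  | succ n ih =>
    intro l hl h
    cases l with
    | nil => simp [pvWords]
    | cons c rest =>
      rw [pvWords]
      split
      · exact ih rest (by simpa using Nat.le_of_succ_le_succ hl)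
          (fun d hd => h d (List.mem_cons_of_mem c hd))
      · intro w hw
        rcases List.mem_cons.mp hw with hw | hw
        · subst hw
          intro d hd
          rcases List.mem_cons.mp hd with hd | hd
          · subst hd; exact h d List.mem_cons_self
          · exact h d (List.mem_cons_of_mem c ((List.takeWhile_sublist _).subset hd))
        · exact ih (rest.dropWhile pvNotSpace)
            (by have := List.length_dropWhile_le pvNotSpace rest; simp at hl ⊢; omega)
            (fun d hd => h d (List.mem_cons_of_mem c ((List.dropWhile_sublist _).subset hd)))
            w hw

lemma pvWords_tail_allLF (l : List Char) (h : pvTailLF l) :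
    ∀ w ∈ (pvWords l).tail, pvAllLF w := by
  cases l with
  | nil => simp [pvWords]
  | cons c rest =>
    have hrest : pvAllLF rest := h
    rw [pvWords]
    split
    · intro w hw
      exact pvWords_allLF rest.length rest (le_refl _) hrest w (List.mem_of_mem_tail hw)
    · intro w hw
      simp only [List.tail_cons] at hw
      exact pvWords_allLF _ (rest.dropWhile pvNotSpace) (le_refl _)
        (fun d hd => hrest d ((List.dropWhile_sublist _).subset hd)) w hw

-- ---- the flag loop at character level ----

lemma pvIsIn_single' (p : String) (c : Char) (hp : p.toList = [c]) (w : String) :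
    PySem.Str.isIn p w = w.toList.contains c := by
  rcases h : PySem.Str.isIn p w with _ | _
  · have h2 := (PySem.Str.isIn_iff_infix p w)
    rw [h, hp] at h2
    simp only [Bool.false_eq_true, false_iff, List.singleton_infix_iff] at h2
    simp [h2]
  · have h2 := (PySem.Str.isIn_iff_infix p w).mp h
    rw [hp, List.singleton_infix_iff] at h2
    simp [h2]

lemma pvHasEnd_any (w : String) : pvHasEndingPunc w = w.toList.any pvIsEnd := by
  unfold pvHasEndingPunc
  have hd : PySem.Str.isIn "." w = w.toList.contains '.' := pvIsIn_single' "." '.' rfl w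
  have hq : PySem.Str.isIn "?" w = w.toList.contains '?' := pvIsIn_single' "?" '?' rfl w
  have he : PySem.Str.isIn "!" w = w.toList.contains '!' := pvIsIn_single' "!" '!' rfl w
  simp only [List.any_cons, List.any_nil, hd, hq, he, Bool.or_false]
  rcases h : w.toList.any pvIsEnd with _ | _
  · simp only [List.any_eq_false] at h
    have hno : ∀ c, c ∈ w.toList → ¬(c = '.' ∨ c = '?' ∨ c = '!') := by
      intro c hc
      have := h c hc
      simp [pvIsEnd] at this
      tauto
    simp only [List.contains_eq_mem]
    rcases Decidable.em ('.' ∈ w.toList) with h1 | h1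
    · exact absurd (Or.inl rfl) (hno '.' h1)
    rcases Decidable.em ('?' ∈ w.toList) with h2 | h2
    · exact absurd (Or.inr (Or.inl rfl)) (hno '?' h2)
    rcases Decidable.em ('!' ∈ w.toList) with h3 | h3
    · exact absurd (Or.inr (Or.inr rfl)) (hno '!' h3)
    simp [h1, h2, h3]
  · simp only [List.any_eq_true] at h
    obtain ⟨c, hc, hcp⟩ := h
    simp only [pvIsEnd, Bool.or_eq_true, beq_iff_eq] at hcp
    rcases hcp with (rfl | rfl) | rfl
    · simp [List.contains_eq_mem, hc]
    · simp [List.contains_eq_mem, hc]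
    · simp [List.contains_eq_mem, hc]

def pvCapL : List Char → List Char
  | [] => []
  | c :: t => PySem.Chars.upperChar c :: PySem.Chars.lower t

def pvCapL' : List Char → List Char
  | [] => []
  | c :: t => PySem.Chars.upperChar c :: t

def pvBLoopL : Bool → List (List Char) → List (List Char)
  | _, [] => []
  | flag, w :: rest =>
    (if flag then pvCapL w else w)
      :: pvBLoopL ((if flag then pvCapL w else w).any pvIsEnd) rest

lemma pvCapitalize_toList (w : String) : (pyCapitalize w).toList = pvCapL w.toList := by
  unfold pyCapitalize
  rw [String.toList_ofList]
  cases w.toList <;> rfl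

lemma pvBLoop_map (flag : Bool) (ws : List String) :
    (pvBLoop flag ws).map String.toList = pvBLoopL flag (ws.map String.toList) := by
  induction ws generalizing flag with
  | nil => rfl
  | cons w r ih =>
    rw [pvBLoop]
    simp only [List.map_cons, pvBLoopL]
    have hw : (if flag then pyCapitalize w else w).toList
        = (if flag then pvCapL w.toList else w.toList) := by
      cases flag
      · rfl
      · simpa using pvCapitalize_toList w
    rw [← hw]
    congr 1
    rw [ih, pvHasEnd_any, hw]

-- ---- the emitter: words rendered with separators and the capitalize flag ----

def pvT : Bool → Bool → List (List Char) → List Char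
  | _, _, [] => []
  | cap, started, w :: r =>
    (if started then [' '] else []) ++ (if cap then pvCapL' w else w)
      ++ pvT ((if cap then pvCapL' w else w).any pvIsEnd) true r

lemma pvJoin_flatMap (x : List Char) (xs : List (List Char)) :
    PySem.Chars.join [' '] (x :: xs) = x ++ xs.flatMap (fun w => ' ' :: w) := by
  induction xs generalizing x with
  | nil => simp [PySem.Chars.join_singleton]
  | cons y ys ih =>
    rw [PySem.Chars.join_cons_cons, ih y]
    simp

lemma pvLower_fix (w : List Char) (h : pvAllLF w) : PySem.Chars.lower w = w := by
  unfold PySem.Chars.lower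
  induction w with
  | nil => rfl
  | cons c t ih =>
    simp only [List.map_cons]
    rw [h c List.mem_cons_self, ih (fun d hd => h d (List.mem_cons_of_mem c hd))]

lemma pvCapL_eq (w : List Char) (h : pvAllLF w) : pvCapL w = pvCapL' w := by
  cases w with
  | nil => rfl
  | cons c t =>
    show PySem.Chars.upperChar c :: PySem.Chars.lower t = PySem.Chars.upperChar c :: t
    rw [pvLower_fix t (fun d hd => h d (List.mem_cons_of_mem c hd))]

lemma pvT_flatMap (ws : List (List Char)) (h : ∀ w ∈ ws, pvAllLF w) (cap : Bool) :
    pvT cap true ws = (pvBLoopL cap ws).flatMap (fun w => ' ' :: w) := by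
  induction ws generalizing cap with
  | nil => rfl
  | cons w r ih =>
    simp only [pvT, pvBLoopL]
    have hw : (if cap then pvCapL' w else w) = (if cap then pvCapL w else w) := by
      cases cap
      · rfl
      · simp [pvCapL_eq w (h w List.mem_cons_self)]
    rw [hw]
    simp only [List.flatMap_cons]
    rw [ih (fun x hx => h x (List.mem_cons_of_mem w hx))]
    simp

lemma pvT_join (ws : List (List Char)) (h : ∀ w ∈ ws.tail, pvAllLF w) :
    pvT false false ws = PySem.Chars.join [' '] (pvBLoopL false ws) := by
  cases ws with
  | nil => rfl
  | cons w r =>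
    simp only [pvT, pvBLoopL, Bool.false_eq_true, if_false, List.nil_append]
    rw [pvT_flatMap r (by simpa using h) (w.any pvIsEnd)]
    rw [pvJoin_flatMap]

-- ---- the scanner equals the emitter over the word decomposition ----

lemma pvScan_word (w : List Char) (h : ∀ c ∈ w, PySem.Chars.isspace c = false) :
    ∀ (r : List Char) (cap : Bool),
      pvScan cap true true (w ++ r) = w ++ pvScan (cap || w.any pvIsEnd) true true r := by
  induction w with
  | nil => intro r cap; simp
  | cons c t ih =>
    intro r cap
    have hcs : PySem.Chars.isspace c = false := h c List.mem_cons_self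
    simp only [List.cons_append, pvScan, hcs, Bool.false_eq_true, if_false, if_true]
    rw [ih (fun d hd => h d (List.mem_cons_of_mem c hd)) r (cap || pvIsEnd c)]
    simp [Bool.or_assoc]

lemma pvScan_eq_T (n : Nat) : ∀ (l : List Char), l.length ≤ n → ∀ (cap started : Bool),
    pvScan cap false started l = pvT cap started (pvWords l) := by
  induction n with
  | zero =>
    intro l hl cap started
    rw [List.length_eq_zero_iff.mp (Nat.le_zero.mp hl), pvWords_nil]
    rfl
  | succ n ih =>
    intro l hl cap started
    cases l with
    | nil => rw [pvWords_nil]; rfl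
    | cons c rest =>
      by_cases hc : PySem.Chars.isspace c
      · rw [show pvScan cap false started (c :: rest) = pvScan cap false started rest by
          simp only [pvScan]; rw [if_pos hc]]
        rw [ih rest (by simpa using Nat.le_of_succ_le_succ hl) cap started]
        rw [pvWords, if_pos hc]
      · have hsplit : rest = rest.takeWhile pvNotSpace ++ rest.dropWhile pvNotSpace :=
          (List.takeWhile_append_dropWhile).symm
        set c' := if cap then PySem.Chars.upperChar c else c with hc'
        rw [show pvScan cap false started (c :: rest)
            = (if started then [' '] else []) ++ (c' :: pvScan (pvIsEnd c') true true rest) by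
          simp only [pvScan]; rw [if_neg hc, if_neg (by simp)]]
        rw [pvWords, if_neg hc]
        simp only [pvT]
        have htw : ∀ d ∈ rest.takeWhile pvNotSpace, PySem.Chars.isspace d = false := by
          intro d hd
          have := List.mem_takeWhile_imp hd
          simpa [pvNotSpace] using this
        conv_lhs => rw [hsplit]
        rw [show pvScan (pvIsEnd c') true true (rest.takeWhile pvNotSpace ++ rest.dropWhile pvNotSpace)
            = rest.takeWhile pvNotSpace
                ++ pvScan (pvIsEnd c' || (rest.takeWhile pvNotSpace).any pvIsEnd) true true
                    (rest.dropWhile pvNotSpace) from pvScan_word _ htw _ _]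
        have hcap : (if cap then pvCapL' (c :: rest.takeWhile pvNotSpace)
              else (c :: rest.takeWhile pvNotSpace)) = c' :: rest.takeWhile pvNotSpace := by
          cases cap <;> simp [pvCapL', hc']
        rw [hcap]
        have hany : (c' :: rest.takeWhile pvNotSpace).any pvIsEnd
            = (pvIsEnd c' || (rest.takeWhile pvNotSpace).any pvIsEnd) := by simp
        rw [hany]
        have hdlen : (rest.dropWhile pvNotSpace).length ≤ n := by
          have := List.length_dropWhile_le pvNotSpace rest
          simp at hl; omega
        cases hdw : rest.dropWhile pvNotSpace with
        | nil =>
          rw [pvWords_nil]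
          simp
          rfl
        | cons d r' =>
          have hd : PySem.Chars.isspace d = true := by
            have hne : rest.dropWhile pvNotSpace ≠ [] := by rw [hdw]; simp
            have h0 := List.head_dropWhile_not (p := pvNotSpace) (l := rest) hne
            have h1 : (rest.dropWhile pvNotSpace).head hne = d := by simp [hdw]
            rw [h1] at h0
            simpa [pvNotSpace] using h0
          rw [show pvScan (pvIsEnd c' || (rest.takeWhile pvNotSpace).any pvIsEnd) true true (d :: r')
              = pvScan (pvIsEnd c' || (rest.takeWhile pvNotSpace).any pvIsEnd) false true r' by
            simp only [pvScan]; rw [if_pos hd]]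
          rw [ih r' (by rw [hdw] at hdlen; simp at hdlen; omega) _ true]
          rw [show pvWords (d :: r') = pvWords r' by rw [pvWords, if_pos hd]]
          simp

-- ---- assembly ----

lemma pvFinal (F : String) (hF : pvTailLF F.toList) :
    PySem.Str.join " " (pvBLoop false (PySem.Str.split₀ F))
      = String.ofList (pvScan false false false F.toList) := by
  have h1 : (PySem.Str.join " " (pvBLoop false (PySem.Str.split₀ F))).toList
      = pvScan false false false F.toList := by
    rw [PySem.Str.toList_join, pvBLoop_map, PySem.Str.split₀_map_toList, pvSplit_eq_words]
    rw [show (" " : String).toList = [' '] from rfl]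
    rw [← pvT_join _ (pvWords_tail_allLF F.toList hF)]
    rw [← pvScan_eq_T (F.toList.length) F.toList (le_refl _)]
  rw [← h1, String.ofList_toList]

-- ===== VERDICT (by name: the statement is the Claim_ definition above) =====
theorem fix_punctuation_and_display_spec : Claim_equal_fix_punctuation_and_display := by
  intro story _
  unfold Spec_fix_punctuation_and_display fix_punctuation_and_display fix_punctuation_and_display_alt
  simp only [pvPhase2]
  exact pvFinal _ (pvTailLF_foldl _ _ (pvTailLF_capitalize story))
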